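-- pv_equiv track=rewrite | github.com/Nithin-Anand/advent_of_code_2025 | src/two/solutions.py | check_repeating_solution
-- ===== SOURCE A (Python) =====
-- def check_repeating_solution(string_n: str, segments) -> bool:
--     if len(string_n) % segments != 0:
--         return False
--     else:
--         segment_size = len(string_n) // segments
--         slices = range(0, len(string_n) + 1, segment_size)
--
--         for i in range(1, segments):
--             first_slice = string_n[slices[i-1]:slices[i]]
--             second_slice = string_n[slices[i]:slices[i+1]]
--
--             if first_slice == second_slice:
--                 continue
--             else:
--                 return False
--     return True
--
--
--
--
--
--
--     return True
-- ===== SOURCE B (Python) =====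
-- def check_repeating_solution(string_n: str, segments) -> bool:
--     if len(string_n) % segments != 0:
--         return False
--     block = string_n[: len(string_n) // segments]
--     return string_n == block * segments
-- ===== Notes on version B (the rewrite author's own statement) =====
-- stated objective: idiomatic
-- what changed: Replaces the index-range bookkeeping and adjacent-slice comparison loop with the standard repeat-and-compare test: string_n == string_n[:len//segments] * segments.
-- intended difference: For segments < 0 with len(string_n) divisible by segments (string non-empty), A returns True because both its loops are empty, while B returns False, the intended answer since a non-empty string is never a concatenation of a negative number of blocks. — e.g. on check_repeating_solution("ab", -2): A returns true, B returns false
import Mathlib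
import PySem

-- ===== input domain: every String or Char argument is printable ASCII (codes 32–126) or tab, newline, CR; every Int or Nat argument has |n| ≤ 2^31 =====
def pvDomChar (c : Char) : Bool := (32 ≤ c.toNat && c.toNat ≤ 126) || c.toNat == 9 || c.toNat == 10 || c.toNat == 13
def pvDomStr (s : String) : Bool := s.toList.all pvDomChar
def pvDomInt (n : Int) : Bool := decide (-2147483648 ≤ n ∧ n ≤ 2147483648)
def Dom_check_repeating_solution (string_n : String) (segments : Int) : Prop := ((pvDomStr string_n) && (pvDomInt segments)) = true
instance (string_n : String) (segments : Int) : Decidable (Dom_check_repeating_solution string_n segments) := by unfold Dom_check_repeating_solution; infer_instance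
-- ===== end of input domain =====

-- B replaces A's slice-index bookkeeping loop with the idiomatic repeat-and-compare test
-- (string == block * segments); equivalent outside D_ (negative divisible segments, where
-- A's empty loops accidentally return True and B returns the intended False).


-- ===== PORT A =====
-- the 'for i in range(1, segments)' loop with its early 'return False'
-- (pyGetD 0 stands for slices[...]; under Pre_ every index is in range, so the default is never read)
def pvALoop (s : List Char) (slices : List Int) : List Int → Bool
  | [] => true
  | i :: rest =>
    let first_slice := PySem.List.slice s (some (PySem.List.pyGetD slices (i - 1) 0)) (some (PySem.List.pyGetD slices i 0))
    let second_slice := PySem.List.slice s (some (PySem.List.pyGetD slices i 0)) (some (PySem.List.pyGetD slices (i + 1) 0))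
    if first_slice == second_slice then pvALoop s slices rest else false

def check_repeating_solution (string_n : String) (segments : Int) : Bool :=
  let s := string_n.toList
  let n : Int := s.length
  if PySem.Int.mod n segments ≠ 0 then false
  else
    let segment_size := PySem.Int.floordiv n segments
    let slices := PySem.List.pyRange 0 (n + 1) segment_size
    pvALoop s slices (PySem.List.pyRange 1 segments 1)

-- ===== PORT B =====
-- Python str * int: empty for non-positive multiplier
def pvRepeat (l : List Char) (k : Int) : List Char :=
  if k ≤ 0 then [] else (List.replicate k.toNat l).flatten

def check_repeating_solution_alt (string_n : String) (segments : Int) : Bool :=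
  let s := string_n.toList
  let n : Int := s.length
  if PySem.Int.mod n segments ≠ 0 then false
  else
    let block := PySem.List.slice s none (some (PySem.Int.floordiv n segments))
    s == pvRepeat block segments

-- ===== PRECONDITION & SPEC =====
-- Pre_ excludes exactly the inputs where A raises: segments = 0 (ZeroDivisionError) and the
-- empty string (its 'range(0, 1, 0)' raises ValueError).
def Pre_check_repeating_solution (string_n : String) (segments : Int) : Prop :=
  segments ≠ 0 ∧ string_n.toList ≠ []
instance (string_n : String) (segments : Int) : Decidable (Pre_check_repeating_solution string_n segments) := by unfold Pre_check_repeating_solution; infer_instance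

def pvWitness_check_repeating_solution : String × Int := ("abab", 2)

-- For segments < 0 with the (non-empty) string's length divisible by segments, A returns True
-- because both of its loops are empty, while B returns False — the intended answer, since a
-- non-empty string is never a concatenation of a negative number of blocks.
def D_check_repeating_solution (string_n : String) (segments : Int) : Prop :=
  segments < 0 ∧ segments ∣ (string_n.toList.length : Int)
instance (string_n : String) (segments : Int) : Decidable (D_check_repeating_solution string_n segments) := by unfold D_check_repeating_solution; infer_instance

def Spec_check_repeating_solution (string_n : String) (segments : Int) (out : Bool) : Prop :=
  ¬ D_check_repeating_solution string_n segments → out = check_repeating_solution_alt string_n segments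
instance (string_n : String) (segments : Int) (out : Bool) : Decidable (Spec_check_repeating_solution string_n segments out) := by unfold Spec_check_repeating_solution; infer_instance

def pvDiffWitness_check_repeating_solution : String × Int := ("ab", -2)
def pvDiffWitnessOut_check_repeating_solution : Bool × Bool := (true, false)

-- ===== CLAIM (what is proved, stated in full; the proofs are below) =====
def Claim_unchanged_check_repeating_solution : Prop := ∀ (string_n : String) (segments : Int), Dom_check_repeating_solution string_n segments → Pre_check_repeating_solution string_n segments → Spec_check_repeating_solution string_n segments (check_repeating_solution string_n segments)
def Claim_changed_check_repeating_solution : Prop := Dom_check_repeating_solution (pvDiffWitness_check_repeating_solution.1) (pvDiffWitness_check_repeating_solution.2) ∧ Pre_check_repeating_solution (pvDiffWitness_check_repeating_solution.1) (pvDiffWitness_check_repeating_solution.2) ∧ D_check_repeating_solution (pvDiffWitness_check_repeating_solution.1) (pvDiffWitness_check_repeating_solution.2) ∧ check_repeating_solution (pvDiffWitness_check_repeating_solution.1) (pvDiffWitness_check_repeating_solution.2) = pvDiffWitnessOut_check_repeating_solution.1 ∧ check_repeating_solution_alt (pvDiffWitness_check_repeating_solution.1) (pvDiffWitness_check_repeating_solution.2)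 = pvDiffWitnessOut_check_repeating_solution.2 ∧ pvDiffWitnessOut_check_repeating_solution.1 ≠ pvDiffWitnessOut_check_repeating_solution.2
def Claim_exact_check_repeating_solution : Prop := ∀ (string_n : String) (segments : Int), Dom_check_repeating_solution string_n segments → Pre_check_repeating_solution string_n segments → D_check_repeating_solution string_n segments → check_repeating_solution string_n segments ≠ check_repeating_solution_alt string_n segments


-- ===== LEMMAS AND PROOFS =====

-- l = t^m  iff  every k-block of l equals t
lemma pv_rep_iff {k : Nat} (t : List Char) (ht : t.length = k) :
    ∀ (m : Nat) (l : List Char), l.length = m * k →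
      (l = (List.replicate m t).flatten ↔ ∀ j < m, (l.drop (k*j)).take k = t) := by
  intro m
  induction m with
  | zero =>
    intro l hl
    simp at hl
    simp [hl]
  | succ m ih =>
    intro l hl
    have hlen : k ≤ l.length := by simp [hl, Nat.succ_mul]
    have hdl : (l.drop k).length = m * k := by simp [hl, Nat.succ_mul]
    have hblock : ∀ j : Nat, (l.drop (k*(j+1))).take k = ((l.drop k).drop (k*j)).take k := by
      intro j
      rw [List.drop_drop]
      ring_nf
    constructor
    · intro h
      have htake : l.take k = t := by
        rw [h, List.replicate_succ, List.flatten_cons, List.take_append_of_le_length (by omega)]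
        simp [← ht]
      have hdrop : l.drop k = (List.replicate m t).flatten := by
        rw [h, List.replicate_succ, List.flatten_cons, List.drop_append_of_le_length (by omega)]
        simp [← ht]
      intro j hj
      cases j with
      | zero => simpa using htake
      | succ j =>
        rw [hblock j]
        exact (ih (l.drop k) hdl).mp hdrop j (by omega)
    · intro h
      have htake : l.take k = t := by simpa using h 0 (by omega)
      have hdrop : l.drop k = (List.replicate m t).flatten := by
        refine (ih (l.drop k) hdl).mpr ?_
        intro j hj
        rw [← hblock j]
        exact h (j+1) (by omega)
      rw [List.replicate_succ, List.flatten_cons, ← hdrop, ← htake]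
      exact (List.take_append_drop k l).symm

-- adjacent equality of a chain of blocks is equality to the first block
lemma pv_chain_iff (B : Nat → List Char) (m : Nat) :
    (∀ j, j + 1 < m → B j = B (j+1)) ↔ (∀ j, j < m → B j = B 0) := by
  constructor
  · intro h j hj
    induction j with
    | zero => rfl
    | succ j ih => rw [← h j (by omega)]; exact ih (by omega)
  · intro h j hj
    rw [h j (by omega), h (j+1) (by omega)]

-- A's early-return loop is an 'all' over the index list
lemma pv_aLoop_eq_all (s : List Char) (slices : List Int) (idxs : List Int) :
    pvALoop s slices idxs = idxs.all (fun i =>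
      PySem.List.slice s (some (PySem.List.pyGetD slices (i - 1) 0)) (some (PySem.List.pyGetD slices i 0))
        == PySem.List.slice s (some (PySem.List.pyGetD slices i 0)) (some (PySem.List.pyGetD slices (i + 1) 0))) := by
  induction idxs with
  | nil => rfl
  | cons i rest ih =>
    simp only [pvALoop, List.all_cons, ih]
    split <;> simp_all

-- slices[i] = k*i for the positive-step range A builds
lemma pv_slices_eval (m k : Nat) (hk : 0 < k) (i : Nat) (hi : i < m + 1) :
    PySem.List.pyGetD (PySem.List.pyRange 0 ((m * k : Nat) + 1) (k : Int)) (i : Int) 0 = (k * i : Nat) := by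
  rw [PySem.List.pyRange_of_pos 0 _ (by exact_mod_cast hk)]
  have hcnt : (if (0:Int) < (m*k:Nat) + 1 then ((((m*k:Nat):Int) + 1 - 0 + k - 1) / k).toNat else 0) = m + 1 := by
    rw [if_pos (by positivity)]
    have h1 : (((m*k:Nat):Int) + 1 - 0 + k - 1) = ((m*k+k : Nat) : Int) := by push_cast; ring
    rw [h1, ← Int.natCast_div]
    have h2 : (m*k+k)/k = m+1 := by
      rw [show m*k+k = (m+1)*k by ring, Nat.mul_div_cancel _ hk]
    simp [h2]
  rw [hcnt, PySem.List.pyGetD_natCast, PySem.List.getD_map_range _ _ _ _ hi]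
  push_cast; ring

-- the core equivalence on the divisible, positive-segments path
lemma pv_main_pos (l : List Char) (m k : Nat) (hm : 0 < m) (hk : 0 < k) (hl : l.length = m * k) :
    pvALoop l (PySem.List.pyRange 0 ((l.length : Int) + 1) (k : Int)) (PySem.List.pyRange 1 (m : Int) 1)
      = (l == pvRepeat (l.take k) (m : Int)) := by
  have ht : (l.take k).length = k := by simp [hl]; nlinarith
  have hrep : pvRepeat (l.take k) (m : Int) = (List.replicate m (l.take k)).flatten := by
    simp [pvRepeat]; omega
  rw [pv_aLoop_eq_all, hrep, Bool.eq_iff_iff, List.all_eq_true, beq_iff_eq,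
    pv_rep_iff (l.take k) ht m l hl]
  have hget : ∀ i : Nat, i < m + 1 →
      PySem.List.pyGetD (PySem.List.pyRange 0 ((l.length : Int) + 1) (k : Int)) (i : Int) 0 = (k * i : Nat) := by
    intro i hi
    have := pv_slices_eval m k hk i hi
    rwa [show ((m * k : Nat) : Int) = (l.length : Int) by rw [hl]] at this
  have hslice : ∀ a : Nat, PySem.List.slice l (some ((k*a : Nat) : Int)) (some ((k*(a+1) : Nat) : Int)) = (l.drop (k*a)).take k := by
    intro a
    rw [PySem.List.slice_natCast]
    congr 1
    rw [Nat.mul_succ]; omega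
  have hB0 : (l.drop (k*0)).take k = l.take k := by simp
  rw [show (∀ j < m, (l.drop (k*j)).take k = l.take k) ↔ (∀ j, j < m → (l.drop (k*j)).take k = (l.drop (k*0)).take k) by rw [hB0],
    ← pv_chain_iff (fun j => (l.drop (k*j)).take k) m]
  constructor
  · intro h j hj
    have hmem : ((j+1 : Nat) : Int) ∈ PySem.List.pyRange 1 (m : Int) 1 :=
      PySem.List.mem_pyRange_one.mpr ⟨by push_cast; omega, by push_cast; omega⟩
    have := h _ hmem
    rw [show ((j+1 : Nat) : Int) - 1 = ((j : Nat) : Int) by push_cast; ring,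
      show ((j+1 : Nat) : Int) + 1 = ((j+2 : Nat) : Int) by push_cast; ring,
      hget j (by omega), hget (j+1) (by omega), hget (j+2) (by omega),
      hslice j, show k*(j+2) = k*((j+1)+1) by ring, hslice (j+1)] at this
    simpa using this
  · intro h i hi
    rw [PySem.List.mem_pyRange_one] at hi
    obtain ⟨h1, h2⟩ := hi
    set j : Nat := i.toNat - 1 with hj
    have hij : i = ((j+1 : Nat) : Int) := by omega
    have hjm : j + 1 < m := by omega
    rw [hij,
      show ((j+1 : Nat) : Int) - 1 = ((j : Nat) : Int) by push_cast; ring,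
      show ((j+1 : Nat) : Int) + 1 = ((j+2 : Nat) : Int) by push_cast; ring,
      hget j (by omega), hget (j+1) (by omega), hget (j+2) (by omega),
      hslice j, show k*(j+2) = k*((j+1)+1) by ring, hslice (j+1)]
    simpa using h j hjm

-- ===== VERDICT (by name: the statement is the Claim_ definition above) =====
theorem check_repeating_solution_spec : Claim_unchanged_check_repeating_solution := by
  intro string_n segments hdom hpre hnd
  obtain ⟨hseg, hne⟩ := hpre
  set l := string_n.toList with hlst
  by_cases hmod : PySem.Int.mod (l.length : Int) segments = 0
  · have hdvd : segments ∣ (l.length : Int) := (PySem.Int.mod_eq_zero_iff_dvd _ _).mp hmod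
    rcases lt_trichotomy segments 0 with hneg | hzero | hpos
    · exact absurd ⟨hneg, by rwa [hlst] at hdvd⟩ hnd
    · exact absurd hzero hseg
    · set m : Nat := segments.toNat with hmdef
      have hsegm : segments = (m : Int) := by omega
      have hm : 0 < m := by omega
      have hmdvd : m ∣ l.length := by
        rwa [hsegm, Int.natCast_dvd_natCast] at hdvd
      set k : Nat := l.length / m with hkdef
      have hl : l.length = m * k := (Nat.mul_div_cancel' hmdvd).symm
      have hk : 0 < k := by
        have hn0 : l.length ≠ 0 := fun h => hne (List.eq_nil_of_length_eq_zero h)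
        exact Nat.pos_of_ne_zero (fun h => hn0 (by rw [hl, h, Nat.mul_zero]))
      have hfd : PySem.Int.floordiv (l.length : Int) segments = (k : Int) := by
        rw [PySem.Int.floordiv_eq_ediv_of_pos hpos, hsegm, hl]
        push_cast
        rw [Int.mul_ediv_cancel_left _ (by exact_mod_cast hm.ne')]
      rw [hsegm] at hmod hfd
      simp only [check_repeating_solution, check_repeating_solution_alt, ← hlst, hsegm, hmod,
        ne_eq, not_true_eq_false, if_false, hfd,
        PySem.List.slice_to _ (by positivity : (0:Int) ≤ (k:Int)), Int.toNat_natCast]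
      exact pv_main_pos l m k hm hk hl
  · simp only [check_repeating_solution, check_repeating_solution_alt, ← hlst]
    rw [if_pos hmod, if_pos hmod]

theorem check_repeating_solution_changed : Claim_changed_check_repeating_solution := by
  unfold Claim_changed_check_repeating_solution; decide

theorem check_repeating_solution_tight : Claim_exact_check_repeating_solution := by
  intro string_n segments hdom hpre hD
  obtain ⟨hseg, hne⟩ := hpre
  obtain ⟨hneg, hdvd⟩ := hD
  set l := string_n.toList with hlst
  have hmod : PySem.Int.mod (l.length : Int) segments = 0 :=
    (PySem.Int.mod_eq_zero_iff_dvd _ _).mpr hdvd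
  have hA : check_repeating_solution string_n segments = true := by
    simp only [check_repeating_solution, ← hlst, hmod, ne_eq, not_true_eq_false, if_false]
    rw [pv_aLoop_eq_all, List.all_eq_true]
    intro i hi
    have := PySem.List.mem_pyRange_one.mp hi
    omega
  have hB : check_repeating_solution_alt string_n segments = false := by
    simp only [check_repeating_solution_alt, ← hlst, hmod, ne_eq, not_true_eq_false, if_false,
      pvRepeat, if_pos (le_of_lt hneg)]
    rw [beq_eq_false_iff_ne]
    exact hne
  rw [hA, hB]
  simp
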